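-- pv_equiv track=rewrite | github.com/resistics/resistics-readers | resistics_readers/metronix/calibration.py | _get_chopper_lines
-- ===== SOURCE A (Python) =====
-- from typing import List, Tuple
--
-- def _get_chopper_lines(lines: List[str]) -> Tuple[int, int]:
--     """Get the lines indices for starting chopper on and chopper off data
--
--     Parameters
--     ----------
--     lines : List[str]
--         A list of strings read in from a Metronix calibration file
--
--     Returns
--     -------
--     il_chopper_on : int
--         Line number for chopper on
--     il_chopper_off : int
--         Line number for chopper off
--     """
--     il_chopper_on: int = 0
--     il_chopper_off: int = 0
--     for il, line in enumerate(lines):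
--         if "Chopper On" in line:
--             il_chopper_on = il
--         if "Chopper Off" in line:
--             il_chopper_off = il
--     return il_chopper_on, il_chopper_off
-- ===== SOURCE B (Python) =====
-- from typing import List, Tuple
--
-- def _get_chopper_lines(lines: List[str]) -> Tuple[int, int]:
--     """Scan from the end; record the first (i.e. last overall) occurrence of
--     each marker and stop as soon as both are found."""
--     il_chopper_on = 0
--     il_chopper_off = 0
--     found_on = False
--     found_off = False
--     il = len(lines) - 1
--     for line in reversed(lines):
--         if not found_on and "Chopper On" in line:
--             il_chopper_on = il
--             found_on = True
--         if not found_off and "Chopper Off" in line: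
--             il_chopper_off = il
--             found_off = True
--         if found_on and found_off:
--             break
--         il -= 1
--     return il_chopper_on, il_chopper_off
-- ===== Notes on version B (the rewrite author's own statement) =====
-- stated objective: alternative
-- what changed: Replaces the full forward scan that keeps overwriting the two indices by a backward scan over reversed(lines) that records each marker's last occurrence on first sight and breaks as soon as both are found.
import Mathlib
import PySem

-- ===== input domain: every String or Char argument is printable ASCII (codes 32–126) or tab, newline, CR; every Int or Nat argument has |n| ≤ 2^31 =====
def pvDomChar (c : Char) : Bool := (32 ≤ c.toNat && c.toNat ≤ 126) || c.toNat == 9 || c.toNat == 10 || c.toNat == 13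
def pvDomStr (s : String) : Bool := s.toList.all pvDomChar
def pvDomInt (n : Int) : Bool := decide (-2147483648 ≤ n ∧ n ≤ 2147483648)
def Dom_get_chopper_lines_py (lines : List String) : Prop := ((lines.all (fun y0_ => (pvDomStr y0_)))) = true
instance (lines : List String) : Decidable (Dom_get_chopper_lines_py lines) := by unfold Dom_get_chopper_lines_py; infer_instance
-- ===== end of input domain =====

-- B replaces A's full forward scan by a backward scan with early exit once both markers are found (alternative decomposition, same result).


-- ===== PORT A =====
def get_chopper_lines_py (lines : List String) : Int × Int :=
  (PySem.List.enumerate lines 0).foldl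
    (fun (st : Int × Int) (p : Int × String) =>
      let st1 := if PySem.Str.isIn "Chopper On" p.2 then (p.1, st.2) else st
      if PySem.Str.isIn "Chopper Off" p.2 then (st1.1, p.1) else st1)
    (0, 0)

-- ===== PORT B =====
-- the loop over reversed(lines), with il counting down and the break when both are found
def gclGoAlt (il onI offI : Int) (fOn fOff : Bool) : List String → Int × Int
  | [] => (onI, offI)
  | line :: rest =>
    let s1 := if !fOn && PySem.Str.isIn "Chopper On" line then (il, true) else (onI, fOn)
    let s2 := if !fOff && PySem.Str.isIn "Chopper Off" line then (il, true) else (offI, fOff)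
    if s1.2 && s2.2 then (s1.1, s2.1)
    else gclGoAlt (il - 1) s1.1 s2.1 s1.2 s2.2 rest

def get_chopper_lines_py_alt (lines : List String) : Int × Int :=
  gclGoAlt ((lines.length : Int) - 1) 0 0 false false lines.reverse

-- ===== PRECONDITION & SPEC =====
def Spec_get_chopper_lines_py (lines : List String) (out : Int × Int) : Prop := out = get_chopper_lines_py_alt lines
instance (lines : List String) (out : Int × Int) : Decidable (Spec_get_chopper_lines_py lines out) := by unfold Spec_get_chopper_lines_py; infer_instance

-- ===== CLAIM (what is proved, stated in full; the proofs are below) =====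
def Claim_equal_get_chopper_lines_py : Prop := ∀ (lines : List String), Dom_get_chopper_lines_py lines → Spec_get_chopper_lines_py lines (get_chopper_lines_py lines)

-- ===== LEMMAS AND PROOFS =====

-- last index at which p holds (default d), phrased as A's one-component fold
def gclLast (p : String → Bool) (xs : List String) (d : Int) : Int :=
  (PySem.List.enumerate xs 0).foldl (fun a q => if p q.2 then q.1 else a) d

theorem gclLast_snoc (p : String → Bool) (xs : List String) (x : String) (d : Int) :
    gclLast p (xs ++ [x]) d = if p x then (xs.length : Int) else gclLast p xs d := by
  simp [gclLast, PySem.List.enumerate_append]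

-- A's pair fold splits into the two component folds
theorem gclA_split (ps : List (Int × String)) (a b : Int) :
    ps.foldl
      (fun (st : Int × Int) (p : Int × String) =>
        let st1 := if PySem.Str.isIn "Chopper On" p.2 then (p.1, st.2) else st
        if PySem.Str.isIn "Chopper Off" p.2 then (st1.1, p.1) else st1)
      (a, b)
    = (ps.foldl (fun a q => if PySem.Str.isIn "Chopper On" q.2 then q.1 else a) a,
       ps.foldl (fun b q => if PySem.Str.isIn "Chopper Off" q.2 then q.1 else b) b) := by
  induction ps generalizing a b with
  | nil => rfl
  | cons q ps ih =>
    simp only [List.foldl_cons]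
    have hst : (let st1 := if PySem.Str.isIn "Chopper On" q.2 then (q.1, b) else (a, b);
        if PySem.Str.isIn "Chopper Off" q.2 then (st1.1, q.1) else st1)
        = ((if PySem.Str.isIn "Chopper On" q.2 then q.1 else a),
           (if PySem.Str.isIn "Chopper Off" q.2 then q.1 else b)) := by
      by_cases h1 : PySem.Str.isIn "Chopper On" q.2 <;>
        by_cases h2 : PySem.Str.isIn "Chopper Off" q.2 <;> simp_all
    rw [hst, ih]

theorem gclGoAlt_spec (xs : List String) (onI offI : Int) (fOn fOff : Bool) :
    gclGoAlt ((xs.length : Int) - 1) onI offI fOn fOff xs.reverse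
    = ((if fOn then onI else gclLast (fun l => PySem.Str.isIn "Chopper On" l) xs onI),
       (if fOff then offI else gclLast (fun l => PySem.Str.isIn "Chopper Off" l) xs offI)) := by
  induction xs using List.reverseRecOn generalizing onI offI fOn fOff with
  | nil => simp [gclGoAlt, gclLast, PySem.List.enumerate]
  | append_singleton ys x ih =>
    rw [List.reverse_append, List.reverse_singleton, List.singleton_append]
    have hlen : ((ys ++ [x]).length : Int) - 1 = (ys.length : Int) := by
      simp
    rw [hlen, gclGoAlt]
    simp only [gclLast_snoc]
    by_cases hOn : PySem.Str.isIn "Chopper On" x <;>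
      by_cases hOff : PySem.Str.isIn "Chopper Off" x <;>
        cases fOn <;> cases fOff <;>
          simp_all

-- ===== VERDICT (by name: the statement is the Claim_ definition above) =====
theorem get_chopper_lines_py_spec : Claim_equal_get_chopper_lines_py := by
  intro lines _
  show get_chopper_lines_py lines = get_chopper_lines_py_alt lines
  rw [get_chopper_lines_py, get_chopper_lines_py_alt, gclA_split, gclGoAlt_spec]
  simp [gclLast]
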